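-- pv_equiv track=rewrite | github.com/891458249/animRBF | modules/RBFtools/scripts/RBFtools/core_prune.py | shift_quat_starts
-- ===== SOURCE A (Python) =====
-- def shift_quat_starts(starts, removed_output_indices):
--     """Compute new quat-group start indices after some output indices
--     are removed.
--
--     Algorithm:
--       For each *start* in *starts*:
--         1. If any removed index falls inside [start, start+3], the
--            group is INVALIDATED. Output: None (caller filters out
--            or preserves the original start per E.2).
--         2. Else: the group's leader still points to the SAME logical
--            driven attr; only the packed index needs shifting.
--            Output: start - count(removed indices < start).
--
--     Pure function — no scene access, no side effects. Unit-tested by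
--     T_QUAT_GROUP_SHIFT (T4.a-g, permanent guard).
--
--     Parameters
--     ----------
--     starts : list[int]
--     removed_output_indices : iterable[int]
--
--     Returns
--     -------
--     list[int or None]
--         Same length as *starts*; entries are int (shifted index) or
--         None (invalidated group).
--     """
--     rm = sorted(set(int(r) for r in removed_output_indices))
--     new = []
--     for s in starts:
--         s = int(s)
--         if any(s <= r <= s + 3 for r in rm):
--             new.append(None)
--         else:
--             new.append(s - sum(1 for r in rm if r < s))
--     return new
-- ===== SOURCE B (Python) =====
-- def _bl(a, x):
--     # index of first element >= x in sorted list a (hand-written bisect_left)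
--     lo, hi = 0, len(a)
--     while lo < hi:
--         mid = (lo + hi) // 2
--         if a[mid] < x:
--             lo = mid + 1
--         else:
--             hi = mid
--     return lo
--
--
-- def shift_quat_starts(starts, removed_output_indices):
--     rm = sorted(set(int(r) for r in removed_output_indices))
--     new = []
--     for s in starts:
--         s = int(s)
--         i = _bl(rm, s)          # i = number of removed indices < s
--         if i < len(rm) and rm[i] <= s + 3:
--             new.append(None)    # some removed index lies in [s, s+3]
--         else:
--             new.append(s - i)
--     return new
-- ===== Notes on version B (the rewrite author's own statement) =====
-- stated objective: faster
-- what changed: Replaces A's per-start linear scans of the removed list (an `any` over the window and a counting sum) with one hand-written bisect_left binary search into the sorted deduplicated removed indices, giving both the count of smaller removed indices and the window check in O(log m).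
import Mathlib
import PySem

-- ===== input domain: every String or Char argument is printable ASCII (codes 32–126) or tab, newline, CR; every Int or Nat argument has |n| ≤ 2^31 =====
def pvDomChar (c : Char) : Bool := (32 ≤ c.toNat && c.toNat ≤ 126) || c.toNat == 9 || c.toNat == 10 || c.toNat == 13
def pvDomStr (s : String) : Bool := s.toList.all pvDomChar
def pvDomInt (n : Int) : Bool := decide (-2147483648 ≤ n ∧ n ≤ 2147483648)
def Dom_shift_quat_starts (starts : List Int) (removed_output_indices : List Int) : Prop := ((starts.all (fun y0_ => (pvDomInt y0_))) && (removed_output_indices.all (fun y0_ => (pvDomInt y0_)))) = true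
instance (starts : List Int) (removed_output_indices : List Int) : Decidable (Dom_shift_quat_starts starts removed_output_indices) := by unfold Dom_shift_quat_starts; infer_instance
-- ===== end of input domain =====

-- B replaces A's per-start linear scans of the removed list by one hand-written
-- binary search (bisect_left) into the sorted deduplicated removed indices:
-- O((n+m) log m) instead of O(n·m).

-- ===== PORT A =====
-- rm = sorted(set(int(r) for r in removed_output_indices)); per start: linear `any`
-- over rm for the invalidation window, linear counting sum for the shift.
def shift_quat_starts (starts : List Int) (removed_output_indices : List Int) : List (Option Int) :=
  let rm := PySem.List.sorted (PySem.Set.ofList removed_output_indices) (fun x => x) false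
  starts.foldl (fun new s =>
    if rm.any (fun r => decide (s ≤ r) && decide (r ≤ s + 3)) then
      new ++ [none]
    else
      new ++ [some (s - rm.foldl (fun acc r => if r < s then acc + 1 else acc) 0)]) []

-- ===== PORT B =====
-- hand-written bisect_left loop from Source B (`a[mid]` is always in range since
-- lo < hi ≤ len a at every call, so `getD … 0` is exact here)
def blAux (a : List Int) (x : Int) (lo hi : Nat) : Nat :=
  if lo < hi then
    if a.getD ((lo + hi) / 2) 0 < x then blAux a x ((lo + hi) / 2 + 1) hi
    else blAux a x lo ((lo + hi) / 2)
  else lo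
termination_by hi - lo
decreasing_by all_goals omega

def shift_quat_starts_alt (starts : List Int) (removed_output_indices : List Int) : List (Option Int) :=
  let rm := PySem.List.sorted (PySem.Set.ofList removed_output_indices) (fun x => x) false
  starts.foldl (fun new s =>
    let i := blAux rm s 0 rm.length
    if i < rm.length ∧ rm.getD i 0 ≤ s + 3 then new ++ [none]
    else new ++ [some (s - (i : Int))]) []

-- ===== PRECONDITION & SPEC =====
def Spec_shift_quat_starts (starts : List Int) (removed_output_indices : List Int) (out : List (Option Int)) : Prop := out = shift_quat_starts_alt starts removed_output_indices
instance (starts : List Int) (removed_output_indices : List Int) (out : List (Option Int)) : Decidable (Spec_shift_quat_starts starts removed_output_indices out) := by unfold Spec_shift_quat_starts; infer_instance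

-- ===== CLAIM (what is proved, stated in full; the proofs are below) =====
def Claim_equal_shift_quat_starts : Prop := ∀ (starts : List Int) (removed_output_indices : List Int), Dom_shift_quat_starts starts removed_output_indices → Spec_shift_quat_starts starts removed_output_indices (shift_quat_starts starts removed_output_indices)

-- ===== LEMMAS AND PROOFS =====

theorem getD_mono_of_sorted (a : List Int) (h : a.Pairwise (· ≤ ·)) (j k : Nat)
    (hjk : j ≤ k) (hk : k < a.length) : a.getD j 0 ≤ a.getD k 0 := by
  rcases eq_or_lt_of_le hjk with rfl | hlt
  · exact le_refl _
  · have hj : j < a.length := lt_trans hlt hk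
    rw [List.getD_eq_getElem _ _ hj, List.getD_eq_getElem _ _ hk]
    exact List.pairwise_iff_getElem.mp h j k hj hk hlt

theorem blAux_inv (a : List Int) (x : Int) (hs : a.Pairwise (· ≤ ·)) :
    ∀ (lo hi : Nat), lo ≤ hi → hi ≤ a.length →
    (∀ j, j < lo → j < a.length → a.getD j 0 < x) →
    (∀ j, hi ≤ j → j < a.length → x ≤ a.getD j 0) →
    lo ≤ blAux a x lo hi ∧ blAux a x lo hi ≤ hi ∧
    (∀ j, j < blAux a x lo hi → j < a.length → a.getD j 0 < x) ∧
    (∀ j, blAux a x lo hi ≤ j → j < a.length → x ≤ a.getD j 0) := by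
  intro lo hi
  induction lo, hi using blAux.induct a x with
  | case1 lo hi hlt hmid ih =>
    intro _ hhi h1 h2
    rw [blAux, if_pos hlt, if_pos hmid]
    have hmlt : (lo + hi) / 2 < hi := by omega
    obtain ⟨i1, i2, i3, i4⟩ := ih (by omega) hhi
      (fun j hj hjl => lt_of_le_of_lt
        (getD_mono_of_sorted a hs j ((lo + hi) / 2) (by omega) (by omega)) hmid)
      h2
    exact ⟨by omega, by omega, i3, i4⟩
  | case2 lo hi hlt hmid ih =>
    intro _ hhi h1 h2
    rw [blAux, if_pos hlt, if_neg hmid]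
    have hmlt : (lo + hi) / 2 < a.length := by omega
    obtain ⟨i1, i2, i3, i4⟩ := ih (by omega) (by omega) h1
      (fun j hj hjl => le_trans (not_lt.mp hmid)
        (getD_mono_of_sorted a hs ((lo + hi) / 2) j hj hjl))
    exact ⟨i1, by omega, i3, i4⟩
  | case3 lo hi hlt =>
    intro hle _ h1 h2
    rw [blAux, if_neg hlt]
    exact ⟨le_refl _, hle, h1, fun j hj hjl => h2 j (by omega) hjl⟩

theorem foldl_count_aux (a : List Int) (x : Int) (c : Int) :
    a.foldl (fun acc r => if r < x then acc + 1 else acc) c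
      = c + (a.countP (fun r => decide (r < x)) : Int) := by
  induction a generalizing c with
  | nil => simp
  | cons h t ih =>
    simp only [List.foldl_cons, List.countP_cons]
    by_cases hx : h < x <;> simp [hx, ih] <;> push_cast <;> ring

theorem countP_eq_split (a : List Int) (p : Int → Bool) (i : Nat) (hi : i ≤ a.length)
    (h1 : ∀ j, j < i → (hj : j < a.length) → p a[j] = true)
    (h2 : ∀ j, i ≤ j → (hj : j < a.length) → p a[j] = false) :
    a.countP p = i := by
  have hsplit : a = a.take i ++ a.drop i := (List.take_append_drop i a).symm
  rw [hsplit, List.countP_append]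
  have htake : (a.take i).countP p = (a.take i).length := by
    rw [List.countP_eq_length]
    intro b hb
    obtain ⟨j, hj, hjb⟩ := List.mem_iff_getElem.mp hb
    have hj' : j < a.length := lt_of_lt_of_le (lt_of_lt_of_le hj (by simp)) (le_refl _)
    rw [List.getElem_take] at hjb
    have hji : j < i := lt_of_lt_of_le hj (by simp [List.length_take])
    subst hjb
    exact h1 j hji _
  have hdrop : (a.drop i).countP p = 0 := by
    rw [List.countP_eq_zero]
    intro b hb
    obtain ⟨j, hj, hjb⟩ := List.mem_iff_getElem.mp hb
    rw [List.getElem_drop] at hjb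
    subst hjb
    simp [h2 (i + j) (by omega) _]
  rw [htake, hdrop, List.length_take]
  omega

theorem shift_quat_starts_spec : Claim_equal_shift_quat_starts := by
  unfold Claim_equal_shift_quat_starts Spec_shift_quat_starts
  intro starts removed _
  unfold shift_quat_starts shift_quat_starts_alt
  set rm := PySem.List.sorted (PySem.Set.ofList removed) (fun x => x) false with hrm
  have hslt : rm.Pairwise (· < ·) := PySem.List.sorted_ofList_pairwise_lt removed
  have hs : rm.Pairwise (· ≤ ·) := hslt.imp (fun h => le_of_lt h)
  have hstep : ∀ (new : List (Option Int)) (s : Int),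
      (if rm.any (fun r => decide (s ≤ r) && decide (r ≤ s + 3)) then new ++ [none]
       else new ++ [some (s - rm.foldl (fun acc r => if r < s then acc + 1 else acc) 0)])
      = (if blAux rm s 0 rm.length < rm.length ∧ rm.getD (blAux rm s 0 rm.length) 0 ≤ s + 3
         then new ++ [none]
         else new ++ [some (s - (blAux rm s 0 rm.length : Int))]) := by
    intro new s
    obtain ⟨i1, i2, i3, i4⟩ := blAux_inv rm s hs 0 rm.length (Nat.zero_le _) (le_refl _)
      (by omega) (fun j hj hjl => absurd hjl (by omega))
    set i := blAux rm s 0 rm.length with hi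
    have hcond : (rm.any (fun r => decide (s ≤ r) && decide (r ≤ s + 3)) = true)
        ↔ (i < rm.length ∧ rm.getD i 0 ≤ s + 3) := by
      constructor
      · intro hany
        obtain ⟨r, hr, hrb⟩ := List.any_eq_true.mp hany
        simp only [Bool.and_eq_true, decide_eq_true_eq] at hrb
        obtain ⟨j, hj, hjr⟩ := List.mem_iff_getElem.mp hr
        have hji : i ≤ j := by
          by_contra hc
          have := i3 j (by omega) hj
          rw [List.getD_eq_getElem _ _ hj, hjr] at this
          omega
        refine ⟨by omega, le_trans (getD_mono_of_sorted rm hs i j hji hj) ?_⟩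
        rw [List.getD_eq_getElem _ _ hj, hjr]; exact hrb.2
      · rintro ⟨hlen, hle⟩
        refine List.any_eq_true.mpr ⟨rm.getD i 0, ?_, ?_⟩
        · rw [List.getD_eq_getElem _ _ hlen]; exact List.getElem_mem _
        · simp only [Bool.and_eq_true, decide_eq_true_eq]
          exact ⟨i4 i (le_refl _) hlen, hle⟩
    have hcount : rm.foldl (fun acc r => if r < s then acc + 1 else acc) 0 = (i : Int) := by
      rw [foldl_count_aux, countP_eq_split rm (fun r => decide (r < s)) i i2
        (fun j hj hjl => by
          have hv := i3 j hj hjl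
          rw [List.getD_eq_getElem rm 0 hjl] at hv
          simpa using hv)
        (fun j hj hjl => by
          have hv := i4 j hj hjl
          rw [List.getD_eq_getElem rm 0 hjl] at hv
          simp only [decide_eq_false_iff_not]
          omega)]
      ring
    by_cases h : i < rm.length ∧ rm.getD i 0 ≤ s + 3
    · rw [if_pos (hcond.mpr h), if_pos h]
    · rw [if_neg (fun ha => h (hcond.mp ha)), if_neg h, hcount]
  have hfun : (fun (new : List (Option Int)) (s : Int) =>
      if rm.any (fun r => decide (s ≤ r) && decide (r ≤ s + 3)) then new ++ [none]
      else new ++ [some (s - rm.foldl (fun acc r => if r < s then acc + 1 else acc) 0)])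
      = (fun (new : List (Option Int)) (s : Int) =>
      if blAux rm s 0 rm.length < rm.length ∧ rm.getD (blAux rm s 0 rm.length) 0 ≤ s + 3
      then new ++ [none]
      else new ++ [some (s - (blAux rm s 0 rm.length : Int))]) :=
    funext fun new => funext fun s => hstep new s
  simp only [hfun]

-- ===== VERDICT =====
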